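-- pv_equiv track=rewrite | github.com/tvotyakov/codeeval | easy/roller-coaster/code.py | convert_roller_case
-- ===== SOURCE A (Python) =====
-- def convert_roller_case(in_str):
--     ''' (string) -> string
--
--     Returns a new string with the same symbols as in the given in_str,
--     and cases of the symbols according to the following rules:
--         1. The first letter of the line should be in uppercase.
--         2. The next letter should be in lowercase.
--         3. The next letter should be in uppercase, and so on.
--         4. Any characters, except for the letters, are ignored during
--            determination of letter case.
--
--     >>> convert_roller_case('')
--     ''
--
--     >>> convert_roller_case('a')
--     'A'
--
--     >>> convert_roller_case('A')
--     'A'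
--
--     >>> convert_roller_case('abcd')
--     'AbCd'
--
--     >>> convert_roller_case('abc')
--     'AbC'
--
--     >>> convert_roller_case('a b.c')
--     'A b.C'
--
--     >>> convert_roller_case('A B.C-D')
--     'A b.C-d'
--
--     >>> convert_roller_case('To be, or not to be: that is the question.')
--     'To Be, Or NoT tO bE: tHaT iS tHe QuEsTiOn.'
--
--     >>> convert_roller_case("Whether 'tis nobler in the mind to suffer.")
--     "WhEtHeR 'tIs NoBlEr In ThE mInD tO sUfFeR."
--     '''
--     if in_str == '':
--         return ''
--
--     i = 0
--     chars = list(in_str)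
--     for j, ch in enumerate(chars):
--         if 'a' <= ch <= 'z' or 'A' <= ch <= 'Z':
--             chars[j] = ch.upper() if i % 2 == 0 else ch.lower()
--             i += 1
--     return ''.join(chars)
-- ===== SOURCE B (Python) =====
-- def convert_roller_case(in_str):
--     # Three passes: collect the letters, restyle them alternating from uppercase,
--     # then reweave the styled letters back into their original positions.
--     letters = [ch for ch in in_str if ch.isalpha()]
--     styled = [ch.upper() if k % 2 == 0 else ch.lower()
--               for k, ch in enumerate(letters)]
--     it = iter(styled)
--     return ''.join(next(it) if ch.isalpha() else ch for ch in in_str)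
-- ===== Notes on version B (the rewrite author's own statement) =====
-- stated objective: alternative
-- what changed: A toggles case in one in-place loop with a running letter counter; B decomposes into three stages: filter out the letters, restyle that letter list alone by its own index parity, then reweave the styled letters into the original positions in a final pass.
import Mathlib
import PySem

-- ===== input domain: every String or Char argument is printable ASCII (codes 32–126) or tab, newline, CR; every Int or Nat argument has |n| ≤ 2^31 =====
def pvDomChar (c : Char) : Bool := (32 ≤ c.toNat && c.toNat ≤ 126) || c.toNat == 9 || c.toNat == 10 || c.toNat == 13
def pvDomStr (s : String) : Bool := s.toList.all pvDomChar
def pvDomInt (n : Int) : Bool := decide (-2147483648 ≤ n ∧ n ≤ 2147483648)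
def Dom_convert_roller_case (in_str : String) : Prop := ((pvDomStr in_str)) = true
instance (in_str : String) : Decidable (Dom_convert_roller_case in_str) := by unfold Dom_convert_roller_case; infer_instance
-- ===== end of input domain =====

-- B decomposes A's single toggle loop into filter-letters / restyle-by-index / reweave passes (objective: alternative).

-- ===== PORT A =====
-- A's for-loop over enumerate(chars): rewrite chars[j] in order, letter counter i.
def pvALoop : List Char → Nat → List Char
  | [], _ => []
  | ch :: rest, i =>
    if ('a' ≤ ch ∧ ch ≤ 'z') ∨ ('A' ≤ ch ∧ ch ≤ 'Z') then
      (if i % 2 = 0 then PySem.Chars.upperChar ch else PySem.Chars.lowerChar ch) :: pvALoop rest (i + 1)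
    else ch :: pvALoop rest i

def convert_roller_case (in_str : String) : String :=
  if in_str = "" then "" else String.mk (pvALoop in_str.toList 0)

-- ===== PORT B =====
-- the enumerate-comprehension over the letter list: index k starts at 0
def pvStyleGo : List Char → Nat → List Char
  | [], _ => []
  | ch :: rest, k =>
    (if k % 2 = 0 then PySem.Chars.upperChar ch else PySem.Chars.lowerChar ch) :: pvStyleGo rest (k + 1)

-- the reweaving pass: pull the next styled letter at each letter position
def pvWeave : List Char → List Char → List Char
  | [], _ => []
  | ch :: rest, styled =>
    if PySem.Chars.isalpha ch then
      match styled with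
      | s :: ss => s :: pvWeave rest ss
      | [] => pvWeave rest []   -- unreachable: styled holds one entry per letter of the string
    else ch :: pvWeave rest styled

def convert_roller_case_alt (in_str : String) : String :=
  let letters := in_str.toList.filter PySem.Chars.isalpha
  let styled := pvStyleGo letters 0
  String.mk (pvWeave in_str.toList styled)

-- ===== PRECONDITION & SPEC =====
def Spec_convert_roller_case (in_str : String) (out : String) : Prop := out = convert_roller_case_alt in_str
instance (in_str : String) (out : String) : Decidable (Spec_convert_roller_case in_str out) := by unfold Spec_convert_roller_case; infer_instance

-- ===== CLAIM (what is proved, stated in full; the proofs are below) =====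
def Claim_equal_convert_roller_case : Prop := ∀ (in_str : String), Dom_convert_roller_case in_str → Spec_convert_roller_case in_str (convert_roller_case in_str)

-- ===== LEMMAS AND PROOFS =====

theorem pv_isalpha_iff (ch : Char) :
    PySem.Chars.isalpha ch = true ↔ (('a' ≤ ch ∧ ch ≤ 'z') ∨ ('A' ≤ ch ∧ ch ≤ 'Z')) := by
  simp [PySem.Chars.isalpha, PySem.Chars.isupper, PySem.Chars.islower, or_comm]

-- the heart: A's toggle loop equals reweaving the styled letters, for any starting parity i
theorem pvALoop_eq_weave (cs : List Char) : ∀ i : Nat,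
    pvALoop cs i = pvWeave cs (pvStyleGo (cs.filter PySem.Chars.isalpha) i) := by
  induction cs with
  | nil => intro i; simp [pvALoop, pvWeave]
  | cons ch rest ih =>
    intro i
    by_cases h : ('a' ≤ ch ∧ ch ≤ 'z') ∨ ('A' ≤ ch ∧ ch ≤ 'Z')
    · have ha : PySem.Chars.isalpha ch = true := (pv_isalpha_iff ch).mpr h
      simp [pvALoop, pvWeave, h, ha, pvStyleGo, ih]
    · have ha : PySem.Chars.isalpha ch = false := by
        cases hb : PySem.Chars.isalpha ch
        · rfl
        · exact absurd ((pv_isalpha_iff ch).mp hb) h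
      simp [pvALoop, pvWeave, h, ha, ih]

-- ===== VERDICT (by name: the statement is the Claim_ definition above) =====
theorem convert_roller_case_spec : Claim_equal_convert_roller_case := by
  intro in_str _
  unfold Spec_convert_roller_case convert_roller_case convert_roller_case_alt
  by_cases hs : in_str = ""
  · subst hs; rfl
  · simp [hs, pvALoop_eq_weave]
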